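-- pv_equiv track=rewrite | github.com/JingZhaoQi/EchoSmith | backend/app.py | _split_segment_text
-- ===== SOURCE A (Python) =====
-- def _split_segment_text(text: str, max_chars: int = 40) -> list[str]:
--     """Split long text into smaller chunks respecting punctuation, then length."""
--     text = (text or "").strip()
--     if not text:
--         return []
--
--     # First split by sentence-ending punctuation
--     parts: list[str] = []
--     buf = ""
--     for ch in text:
--         buf += ch
--         if ch in "。！？!?；;，,":
--             parts.append(buf.strip())
--             buf = ""
--     if buf.strip():
--         parts.append(buf.strip())
--
--     # Flatten any overly long part into fixed-size chunks
--     final_parts: list[str] = []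
--     for part in parts or [text]:
--         if len(part) <= max_chars:
--             final_parts.append(part)
--             continue
--         for i in range(0, len(part), max_chars):
--             final_parts.append(part[i : i + max_chars].strip())
--     return [p for p in final_parts if p]
-- ===== SOURCE B (Python) =====
-- DELIMS = "\u3002\uff01\uff1f!?\uff1b;\uff0c,"
--
--
-- def _sentences(s):
--     """Split s into punctuation-terminated pieces, each stripped; recursion on the first delimiter."""
--     i = next((k for k, ch in enumerate(s) if ch in DELIMS), None)
--     if i is None:
--         t = s.strip()
--         return [t] if t else []
--     return [s[: i + 1].strip()] + _sentences(s[i + 1:])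
--
--
-- def _chunks(p, max_chars):
--     if len(p) <= max_chars:
--         return [p]
--     return [p[i: i + max_chars].strip() for i in range(0, len(p), max_chars)]
--
--
-- def _split_segment_text(text: str, max_chars: int = 40) -> list[str]:
--     text = (text or "").strip()
--     if not text:
--         return []
--     flat = [c for p in _sentences(text) for c in _chunks(p, max_chars)]
--     return [c for c in flat if c]
-- ===== Notes on version B (the rewrite author's own statement) =====
-- stated objective: simpler
-- what changed: Phase 1's per-character buffer/accumulator loop becomes a recursion that cuts the text at the first delimiter found; phase 2's accumulator loop becomes a flat comprehension over a chunking helper; A's fallback for an empty sentence list (provably unreachable) is dropped.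
import Mathlib
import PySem

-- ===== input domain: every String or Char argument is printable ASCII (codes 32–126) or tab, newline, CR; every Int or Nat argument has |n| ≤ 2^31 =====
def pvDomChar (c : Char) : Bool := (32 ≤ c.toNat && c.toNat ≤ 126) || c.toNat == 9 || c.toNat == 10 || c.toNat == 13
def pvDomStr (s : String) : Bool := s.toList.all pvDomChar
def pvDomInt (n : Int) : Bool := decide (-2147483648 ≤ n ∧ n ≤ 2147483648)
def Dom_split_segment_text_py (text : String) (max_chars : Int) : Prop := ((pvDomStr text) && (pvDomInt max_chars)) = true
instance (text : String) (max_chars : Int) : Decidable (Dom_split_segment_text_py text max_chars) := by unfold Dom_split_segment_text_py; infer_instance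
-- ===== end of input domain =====

-- B replaces A's per-character buffer loop by a recursive split at the first delimiter and the
-- accumulator loops of phase 2 by a flatMap over a chunking helper (objective: simpler); same values.

-- the sentence-ending punctuation "。！？!?；;，," as a list of characters (shared data constant)
def pvDelims : List Char := ['。', '！', '？', '!', '?', '；', ';', '，', ',']

-- ===== PORT A =====
def split_segment_text_py (text : String) (max_chars : Int) : List String :=
  -- text = (text or "").strip(); if not text: return []
  let cs := PySem.Chars.strip text.toList
  if cs = [] then []
  else
    -- phase 1: per-character buffer loop
    let st := cs.foldl
      (fun (st : List (List Char) × List Char) ch =>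
        let buf := st.2 ++ [ch]
        if ch ∈ pvDelims then (st.1 ++ [PySem.Chars.strip buf], []) else (st.1, buf))
      ([], [])
    -- if buf.strip(): parts.append(buf.strip())
    let parts := if PySem.Chars.strip st.2 ≠ [] then st.1 ++ [PySem.Chars.strip st.2] else st.1
    -- for part in parts or [text]:
    let base := if parts = [] then [cs] else parts
    -- phase 2: accumulator loop, appending or extending with fixed-size chunks
    let final := base.foldl
      (fun acc part =>
        if (part.length : Int) ≤ max_chars then acc ++ [part]
        else acc ++ (PySem.List.pyRange 0 (part.length : Int) max_chars).map
          (fun i => PySem.Chars.strip (PySem.List.slice part (some i) (some (i + max_chars)))))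
      []
    -- return [p for p in final_parts if p]
    (final.filter (fun p => decide (p ≠ []))).map (fun p => String.ofList p)

-- ===== PORT B =====
-- _sentences: recursion on the first delimiter position (Source B's next(...) over enumerate = findIdx?)
def pvSentences (s : List Char) : List (List Char) :=
  match hi : s.findIdx? (fun c => decide (c ∈ pvDelims)) with
  | none =>
      let t := PySem.Chars.strip s
      if t ≠ [] then [t] else []
  | some i =>
      PySem.Chars.strip (s.take (i + 1)) :: pvSentences (s.drop (i + 1))
termination_by s.length
decreasing_by
  have h := List.findIdx?_eq_some_iff_findIdx_eq.mp hi
  simp only [List.length_drop]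
  omega

-- _chunks: one part as a list of chunks
def pvChunks (p : List Char) (max_chars : Int) : List (List Char) :=
  if (p.length : Int) ≤ max_chars then [p]
  else (PySem.List.pyRange 0 (p.length : Int) max_chars).map
    (fun i => PySem.Chars.strip (PySem.List.slice p (some i) (some (i + max_chars))))

def split_segment_text_py_alt (text : String) (max_chars : Int) : List String :=
  let cs := PySem.Chars.strip text.toList
  if cs = [] then []
  else
    let flat := (pvSentences cs).flatMap (fun p => pvChunks p max_chars)
    (flat.filter (fun p => decide (p ≠ []))).map (fun p => String.ofList p)

-- ===== PRECONDITION & SPEC =====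
-- Pre_ excludes exactly the inputs where A raises: max_chars = 0 with non-whitespace text makes
-- range(0, len(part), 0) raise ValueError (B's chunking raises identically there).
def Pre_split_segment_text_py (text : String) (max_chars : Int) : Prop :=
  PySem.Chars.strip text.toList = [] ∨ max_chars ≠ 0
instance (text : String) (max_chars : Int) : Decidable (Pre_split_segment_text_py text max_chars) := by
  unfold Pre_split_segment_text_py; infer_instance

def pvWitness_split_segment_text_py : String × Int := ("Hi, there! all good?", 6)

def Spec_split_segment_text_py (text : String) (max_chars : Int) (out : List String) : Prop := out = split_segment_text_py_alt text max_chars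
instance (text : String) (max_chars : Int) (out : List String) : Decidable (Spec_split_segment_text_py text max_chars out) := by unfold Spec_split_segment_text_py; infer_instance

-- ===== CLAIM (what is proved, stated in full; the proofs are below) =====
def Claim_equal_split_segment_text_py : Prop := ∀ (text : String) (max_chars : Int), Dom_split_segment_text_py text max_chars → Pre_split_segment_text_py text max_chars → Spec_split_segment_text_py text max_chars (split_segment_text_py text max_chars)

-- ===== LEMMAS AND PROOFS =====

-- equation lemmas for the recursive _sentences
theorem pvSentences_none (s : List Char)
    (h : s.findIdx? (fun c => decide (c ∈ pvDelims)) = none) :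
    pvSentences s = if PySem.Chars.strip s ≠ [] then [PySem.Chars.strip s] else [] := by
  rw [pvSentences]
  split
  · rfl
  · next i heq => rw [h] at heq; cases heq

theorem pvSentences_some (s : List Char) (i : Nat)
    (h : s.findIdx? (fun c => decide (c ∈ pvDelims)) = some i) :
    pvSentences s
      = PySem.Chars.strip (s.take (i + 1)) :: pvSentences (s.drop (i + 1)) := by
  rw [pvSentences]
  split
  · next heq => rw [h] at heq; cases heq
  · next j heq => rw [h] at heq; injection heq with hj; subst hj; rfl

-- A's phase-1 loop, rewritten as structural recursion on the remaining characters
def pvGA (b : List Char) : List Char → List (List Char)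
  | [] => if PySem.Chars.strip b ≠ [] then [PySem.Chars.strip b] else []
  | c :: cs =>
      if c ∈ pvDelims then PySem.Chars.strip (b ++ [c]) :: pvGA [] cs
      else pvGA (b ++ [c]) cs

-- A's fold plus the trailing-buffer append equals pvGA
theorem pvFoldA_eq (cs : List Char) : ∀ (P : List (List Char)) (b : List Char),
    (let st := cs.foldl
      (fun (st : List (List Char) × List Char) ch =>
        let buf := st.2 ++ [ch]
        if ch ∈ pvDelims then (st.1 ++ [PySem.Chars.strip buf], []) else (st.1, buf))
      (P, b)
     if PySem.Chars.strip st.2 ≠ [] then st.1 ++ [PySem.Chars.strip st.2] else st.1)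
    = P ++ pvGA b cs := by
  induction cs with
  | nil =>
      intro P b
      simp only [List.foldl_nil, pvGA]
      split <;> simp
  | cons c cs ih =>
      intro P b
      simp only [List.foldl_cons, pvGA]
      by_cases hc : c ∈ pvDelims
      · simp only [hc, if_pos]
        rw [ih (P ++ [PySem.Chars.strip (b ++ [c])]) []]
        simp
      · simp only [hc, if_neg, not_false_iff]
        rw [ih P (b ++ [c])]

-- the first delimiter in b ++ c :: cs, when b is delimiter-free and c is a delimiter, is at b.length
theorem pvFindIdx_clean_cons (b : List Char) (hb : ∀ x ∈ b, x ∉ pvDelims) (c : Char)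
    (hc : c ∈ pvDelims) (cs : List Char) :
    (b ++ c :: cs).findIdx? (fun x => decide (x ∈ pvDelims)) = some b.length := by
  induction b with
  | nil => simp [List.findIdx?_cons, hc]
  | cons x b ih =>
      have hx : x ∉ pvDelims := hb x (by simp)
      simp only [List.cons_append, List.findIdx?_cons, hx, decide_false, Bool.false_eq_true,
        if_false]
      rw [ih (fun y hy => hb y (by simp [hy]))]
      simp

-- no delimiter in b : findIdx? is none
theorem pvFindIdx_clean (b : List Char) (hb : ∀ x ∈ b, x ∉ pvDelims) :
    b.findIdx? (fun x => decide (x ∈ pvDelims)) = none := by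
  rw [List.findIdx?_eq_none_iff]
  intro x hx
  simp [hb x hx]

-- pvGA over a delimiter-free buffer b is B's _sentences of b ++ cs
theorem pvGA_eq_sentences (cs : List Char) : ∀ (b : List Char), (∀ x ∈ b, x ∉ pvDelims) →
    pvGA b cs = pvSentences (b ++ cs) := by
  induction cs with
  | nil =>
      intro b hb
      rw [List.append_nil, pvSentences_none b (pvFindIdx_clean b hb)]
      rfl
  | cons c cs ih =>
      intro b hb
      by_cases hc : c ∈ pvDelims
      · rw [pvSentences_some (b ++ c :: cs) b.length (pvFindIdx_clean_cons b hb c hc cs)]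
        have ht : (b ++ c :: cs).take (b.length + 1) = b ++ [c] := by
          rw [List.take_append]; simp
        have hd : (b ++ c :: cs).drop (b.length + 1) = cs := by
          rw [List.drop_append]; simp
        rw [ht, hd]
        simp only [pvGA, hc, if_pos]
        rw [ih [] (by simp)]
        simp
      · have hb' : ∀ x ∈ b ++ [c], x ∉ pvDelims := by
          intro x hx
          rcases List.mem_append.mp hx with h | h
          · exact hb x h
          · rw [List.mem_singleton] at h; subst h; exact hc
        simp only [pvGA, hc, if_neg, not_false_iff]
        rw [ih (b ++ [c]) hb']
        simp

-- dropWhile at both ends applied a second time changes nothing, given a's head already fails p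
theorem pvAux (p : Char → Bool) (a : List Char)
    (hhead : ∀ y ∈ a.head?, p y = false) :
    List.dropWhile p ((List.dropWhile p (List.dropWhile p a.reverse).reverse).reverse)
      = List.dropWhile p a.reverse := by
  by_cases hbe : List.dropWhile p a.reverse = []
  · simp [hbe]
  obtain ⟨x, t, hxt⟩ := List.exists_cons_of_ne_nil
    (l := (List.dropWhile p a.reverse).reverse) (by simp [hbe])
  have hx : a.head? = some x := by
    have h1 : (List.dropWhile p a.reverse).reverse.head? = some x := by rw [hxt]; rfl
    rw [List.head?_reverse] at h1
    obtain ⟨pre, hpre⟩ := List.dropWhile_suffix (l := a.reverse) p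
    have h2 : a.reverse.getLast? = some x := by
      rw [← hpre, List.getLast?_append_of_ne_nil pre hbe]
      exact h1
    rw [List.getLast?_reverse] at h2
    exact h2
  have hpx : p x = false := hhead x (by rw [hx]; simp)
  rw [hxt, List.dropWhile_cons_of_neg (by simp [hpx]), ← hxt, List.reverse_reverse,
    List.dropWhile_idempotent]

-- strip is idempotent
theorem pvStrip_idem (l : List Char) :
    PySem.Chars.strip (PySem.Chars.strip l) = PySem.Chars.strip l := by
  simp only [PySem.Chars.strip, PySem.Chars.lstrip, PySem.Chars.rstrip, List.reverse_inj]
  refine pvAux _ _ ?_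
  intro y hy
  have hne : l.dropWhile PySem.Chars.isspace ≠ [] := by
    intro h; rw [h] at hy; simp at hy
  have hyh : (l.dropWhile PySem.Chars.isspace).head hne = y := by
    rw [List.head?_eq_some_head hne] at hy
    simp only [Option.mem_some_iff] at hy
    exact hy
  rw [← hyh]
  exact List.head_dropWhile_not _ hne

-- A's phase-2 loop is a flatMap of the chunking helper
theorem pvPhase2_eq (base : List (List Char)) (max_chars : Int) :
    base.foldl
      (fun acc part =>
        if (part.length : Int) ≤ max_chars then acc ++ [part]
        else acc ++ (PySem.List.pyRange 0 (part.length : Int) max_chars).map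
          (fun i => PySem.Chars.strip (PySem.List.slice part (some i) (some (i + max_chars)))))
      []
    = base.flatMap (fun p => pvChunks p max_chars) := by
  have h : ∀ (acc : List (List Char)), ∀ part ∈ base,
      (if (part.length : Int) ≤ max_chars then acc ++ [part]
       else acc ++ (PySem.List.pyRange 0 (part.length : Int) max_chars).map
         (fun i => PySem.Chars.strip (PySem.List.slice part (some i) (some (i + max_chars)))))
      = acc ++ pvChunks part max_chars := by
    intro acc part _
    unfold pvChunks
    split <;> rfl
  rw [PySem.List.foldl_congr_mem base _ (fun acc part => acc ++ pvChunks part max_chars) [] h,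
    PySem.List.foldl_append_eq_flatMap]
  simp

-- _sentences of a non-empty already-stripped list is non-empty
theorem pvSentences_ne_nil (cs : List Char) (hcs : cs ≠ [])
    (hstrip : PySem.Chars.strip cs = cs) : pvSentences cs ≠ [] := by
  cases hfi : cs.findIdx? (fun c => decide (c ∈ pvDelims)) with
  | none => rw [pvSentences_none cs hfi]; simp [hstrip, hcs]
  | some i => rw [pvSentences_some cs i hfi]; simp

-- ===== VERDICT (by name: the statement is the Claim_ definition above) =====
theorem split_segment_text_py_spec : Claim_equal_split_segment_text_py := by
  intro text max_chars _ _
  unfold Spec_split_segment_text_py split_segment_text_py split_segment_text_py_alt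
  set cs := PySem.Chars.strip text.toList with hcs
  by_cases hE : cs = []
  · simp [hE]
  simp only [hE, if_neg, not_false_iff]
  have h1 := pvFoldA_eq cs [] []
  simp only [List.nil_append] at h1
  have h2 : pvGA [] cs = pvSentences cs := by
    have := pvGA_eq_sentences cs [] (by simp)
    simpa using this
  have hstrip : PySem.Chars.strip cs = cs := hcs ▸ pvStrip_idem text.toList
  have h3 : pvSentences cs ≠ [] := pvSentences_ne_nil cs hE hstrip
  rw [h1, h2]
  simp only [h3, if_neg, not_false_iff]
  rw [pvPhase2_eq]
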